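-- pv_equiv track=rewrite | github.com/Muhammad-Ahmed-Qazi/DSA-CS218 | Evaluation/tridiagonal.py | storage
-- ===== SOURCE A (Python) =====
-- def storage(matrix):
--     tridiagonal = list()
--     pos = 0
--     for i in range(len(matrix)):
--         for j in range(len(matrix)):
--             if j == (i - 1) and i != (0):
--                 tridiagonal.append(matrix[i][j])
--                 pos += 1
--             if j == i:
--                 tridiagonal.append(matrix[i][j])
--                 pos += 1
--             if j == (i + 1) and i != (len(matrix) - 1):
--                 tridiagonal.append(matrix[i][j])
--                 pos += 1
--
--     return tridiagonal
-- ===== SOURCE B (Python) =====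
-- def storage(matrix):
--     n = len(matrix)
--     tridiagonal = []
--     for i, row in enumerate(matrix):
--         tridiagonal.extend(row[max(i - 1, 0):min(i + 2, n)])
--     return tridiagonal
-- ===== Notes on version B (the rewrite author's own statement) =====
-- stated objective: faster
-- what changed: Replaces the O(n^2) double scan over all (i,j) pairs with a single pass over the rows that slices the up-to-3 band elements row[max(i-1,0):min(i+2,n)] directly.
import Mathlib
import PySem

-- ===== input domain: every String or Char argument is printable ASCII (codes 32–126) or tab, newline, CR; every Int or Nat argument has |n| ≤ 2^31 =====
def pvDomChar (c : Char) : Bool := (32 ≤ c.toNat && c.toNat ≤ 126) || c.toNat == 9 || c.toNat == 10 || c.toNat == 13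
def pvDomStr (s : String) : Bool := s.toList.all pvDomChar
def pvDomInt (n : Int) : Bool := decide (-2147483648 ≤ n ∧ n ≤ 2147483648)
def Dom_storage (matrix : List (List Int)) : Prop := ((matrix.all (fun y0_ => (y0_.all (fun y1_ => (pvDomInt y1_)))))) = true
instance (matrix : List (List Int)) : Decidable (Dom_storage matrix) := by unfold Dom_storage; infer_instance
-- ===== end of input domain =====

-- B replaces A's O(n^2) double scan over all (i,j) with one pass over the rows,
-- slicing the up-to-3 band elements of each row directly (objective: faster, asymptotic).


-- ===== PORT A =====
-- literal port of A's nested loops; the dead counter 'pos' is omitted.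
-- matrix[i][j] is ported as pyGetD (in-range on every input admitted by Pre_storage).
def storage (matrix : List (List Int)) : List Int :=
  let n : Int := matrix.length
  (PySem.List.pyRange 0 n).foldl (fun tri i =>
    (PySem.List.pyRange 0 n).foldl (fun tri j =>
      let tri := if j = i - 1 ∧ i ≠ 0 then
        tri ++ [PySem.List.pyGetD (PySem.List.pyGetD matrix i []) j 0] else tri
      let tri := if j = i then
        tri ++ [PySem.List.pyGetD (PySem.List.pyGetD matrix i []) j 0] else tri
      let tri := if j = i + 1 ∧ i ≠ n - 1 then
        tri ++ [PySem.List.pyGetD (PySem.List.pyGetD matrix i []) j 0] else tri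
      tri) tri) []

-- ===== PORT B =====
def storage_alt (matrix : List (List Int)) : List Int :=
  let n : Int := matrix.length
  (PySem.List.enumerate matrix).foldl (fun tri p =>
    tri ++ PySem.List.slice p.2 (some (max (p.1 - 1) 0)) (some (min (p.1 + 2) n))) []

-- ===== PRECONDITION & SPEC =====
-- Pre_ admits exactly the inputs on which A returns: row i must contain the largest
-- band index A reads there, min(i+1, n-1); otherwise A raises IndexError.
def Pre_storage (matrix : List (List Int)) : Prop :=
  ∀ i (h : i < matrix.length),
    (if i + 1 < matrix.length then i + 1 else i) < matrix[i].length
instance (matrix : List (List Int)) : Decidable (Pre_storage matrix) := by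
  unfold Pre_storage; infer_instance
def pvWitness_storage : List (List Int) := [[1, 2], [3, 4]]

def Spec_storage (matrix : List (List Int)) (out : List Int) : Prop := out = storage_alt matrix
instance (matrix : List (List Int)) (out : List Int) : Decidable (Spec_storage matrix out) := by unfold Spec_storage; infer_instance

-- ===== CLAIM (what is proved, stated in full; the proofs are below) =====
def Claim_equal_storage : Prop := ∀ (matrix : List (List Int)), Dom_storage matrix → Pre_storage matrix → Spec_storage matrix (storage matrix)

-- ===== LEMMAS AND PROOFS =====

-- proof-only abbreviations: the element A appends, and the evaluated band of row i
def rowf (matrix : List (List Int)) (i j : Int) : Int :=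
  PySem.List.pyGetD (PySem.List.pyGetD matrix i []) j 0

def bandlist (matrix : List (List Int)) (i : Int) : List Int :=
  (if i = 0 then [] else [rowf matrix i (i - 1)]) ++ [rowf matrix i i]
    ++ (if i = (matrix.length : Int) - 1 then [] else [rowf matrix i (i + 1)])

-- flatMap over a range of a function supported on three consecutive points a, a+1, a+2
set_option maxHeartbeats 1000000 in
lemma flatMap_pyRange_band (u v w : List Int) (a : Int) :
    ∀ (m : Nat) (s n : Int), n - s ≤ (m : Int) →
    ((PySem.List.pyRange s n).flatMap fun j =>
        (if j = a then u else []) ++ (if j = a + 1 then v else []) ++ (if j = a + 2 then w else []))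
    = (if s ≤ a ∧ a < n then u else []) ++ (if s ≤ a + 1 ∧ a + 1 < n then v else [])
      ++ (if s ≤ a + 2 ∧ a + 2 < n then w else []) := by
  intro m
  induction m with
  | zero =>
    intro s n h
    have hnil : PySem.List.pyRange s n = [] := by
      apply List.eq_nil_iff_forall_not_mem.mpr
      intro x hx
      have := (PySem.List.mem_pyRange_one).mp hx
      omega
    rw [hnil]
    simp only [List.flatMap_nil]
    split_ifs <;> first | rfl | (exfalso; omega)
  | succ k ih =>
    intro s n h
    by_cases hs : s < n
    · rw [PySem.List.pyRange_one_cons hs]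
      simp only [List.flatMap_cons]
      rw [ih (s + 1) n (by omega)]
      split_ifs <;> first | rfl | (exfalso; omega) | simp
    · have hnil : PySem.List.pyRange s n = [] := by
        apply List.eq_nil_iff_forall_not_mem.mpr
        intro x hx
        have := (PySem.List.mem_pyRange_one).mp hx
        omega
      rw [hnil]
      simp only [List.flatMap_nil]
      split_ifs <;> first | rfl | (exfalso; omega)

-- enumerate xs s, consumed by flatMap, is the same as flatMap over the index range
lemma enumerate_flatMap (g : Int × List Int → List Int) :
    ∀ (xs : List (List Int)) (s : Int),
    (PySem.List.enumerate xs s).flatMap g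
    = (List.range xs.length).flatMap (fun (k : Nat) => g (s + (k : Int), xs.getD k [])) := by
  intro xs
  induction xs with
  | nil => intro s; simp [PySem.List.enumerate]
  | cons x t ih =>
    intro s
    simp only [PySem.List.enumerate, List.flatMap_cons, List.length_cons,
      List.range_succ_eq_map, List.flatMap_map]
    rw [ih (s + 1)]
    congr 1
    · simp
    · apply List.flatMap_congr
      intro k _
      simp only [List.getD_cons_succ]
      congr 1
      push_cast
      ring_nf

-- explicit values of short takes of a dropped list
lemma take_drop_one (l : List Int) (a : Nat) (h : a < l.length) :
    List.take 1 (List.drop a l) = [l.getD a 0] := by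
  rw [List.drop_eq_getElem_cons h, List.getD_eq_getElem l 0 h]
  simp only [List.take_succ_cons, List.take_zero]

lemma take_drop_two (l : List Int) (a : Nat) (h : a + 1 < l.length) :
    List.take 2 (List.drop a l) = [l.getD a 0, l.getD (a + 1) 0] := by
  rw [List.drop_eq_getElem_cons (by omega : a < l.length),
    List.drop_eq_getElem_cons h,
    List.getD_eq_getElem l 0 (by omega : a < l.length), List.getD_eq_getElem l 0 h]
  simp only [List.take_succ_cons, List.take_zero]

lemma take_drop_three (l : List Int) (a : Nat) (h : a + 2 < l.length) :
    List.take 3 (List.drop a l) = [l.getD a 0, l.getD (a + 1) 0, l.getD (a + 2) 0] := by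
  rw [List.drop_eq_getElem_cons (by omega : a < l.length),
    List.drop_eq_getElem_cons (by omega : a + 1 < l.length),
    List.drop_eq_getElem_cons h,
    List.getD_eq_getElem l 0 (by omega : a < l.length),
    List.getD_eq_getElem l 0 (by omega : a + 1 < l.length), List.getD_eq_getElem l 0 h]
  simp only [List.take_succ_cons, List.take_zero]

-- the slice of row k equals the explicit band-element list, under the Pre_ length bound
lemma slice_band (row : List Int) (k len : Nat) (hk : k < len)
    (hb : (if k + 1 < len then k + 1 else k) < row.length) :
    PySem.List.slice row (some (max ((k : Int) - 1) 0)) (some (min ((k : Int) + 2) (len : Int)))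
    = (if (k : Int) = 0 then [] else [row.getD (k - 1) 0]) ++ [row.getD k 0]
      ++ (if (k : Int) = (len : Int) - 1 then [] else [row.getD (k + 1) 0]) := by
  have hmax : max ((k : Int) - 1) 0 = ((k - 1 : Nat) : Int) := by omega
  have hmin : min ((k : Int) + 2) (len : Int) = ((min (k + 2) len : Nat) : Int) := by omega
  rw [hmax, hmin, PySem.List.slice_natCast]
  by_cases h0 : k = 0
  · subst h0
    rw [if_pos (by norm_num : ((0 : Nat) : Int) = 0)]
    by_cases h1 : 1 < len
    · have hr : 1 < row.length := by simpa [h1] using hb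
      have hc : min (0 + 2) len - (0 - 1) = 2 := by omega
      rw [hc, show (0 : Nat) - 1 = 0 from rfl, take_drop_two row 0 (by omega),
        if_neg (by omega : ¬ ((0 : Nat) : Int) = (len : Int) - 1)]
      simp
    · have hr : 0 < row.length := by simpa [h1] using hb
      have hlen1 : len = 1 := by omega
      subst hlen1
      have hc : min (0 + 2) 1 - (0 - 1) = 1 := by omega
      rw [hc, show (0 : Nat) - 1 = 0 from rfl, take_drop_one row 0 hr,
        if_pos (by norm_num : ((0 : Nat) : Int) = ((1 : Nat) : Int) - 1)]
      simp
  · have hk1 : 1 ≤ k := by omega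
    rw [if_neg (by omega : ¬ ((k : Nat) : Int) = 0)]
    by_cases h1 : k + 1 < len
    · have hr : k + 1 < row.length := by simpa [h1] using hb
      have hc : min (k + 2) len - (k - 1) = 3 := by omega
      rw [hc, take_drop_three row (k - 1) (by omega),
        show k - 1 + 1 = k from by omega, show k - 1 + 2 = k + 1 from by omega,
        if_neg (by omega : ¬ ((k : Nat) : Int) = (len : Int) - 1)]
      simp
    · have hr : k < row.length := by simpa [h1] using hb
      have hc : min (k + 2) len - (k - 1) = 2 := by omega
      rw [hc, take_drop_two row (k - 1) (by omega),
        show k - 1 + 1 = k from by omega,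
        if_pos (by omega : ((k : Nat) : Int) = (len : Int) - 1)]
      simp

-- pyGetD at a natural index is getD
lemma pyGetD_row (row : List Int) (m : Nat) (h : m < row.length) :
    PySem.List.pyGetD row ((m : Nat) : Int) 0 = row.getD m 0 := by
  rw [PySem.List.pyGetD_eq_getElem row 0 (by omega) (by exact_mod_cast h),
    List.getD_eq_getElem row 0 h]
  simp

-- A's nested loops evaluate to the flatMap of the per-row band lists
lemma storageA_eval (matrix : List (List Int)) :
    storage matrix
    = (List.range matrix.length).flatMap (fun (k : Nat) => bandlist matrix (k : Int)) := by
  unfold storage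
  simp only []
  refine Eq.trans (PySem.List.foldl_congr_mem _ _
      (fun tri i => tri ++ bandlist matrix i) _ ?_) ?_
  · intro acc i hi
    have hi' := (PySem.List.mem_pyRange_one).mp hi
    simp only []
    refine Eq.trans (PySem.List.foldl_congr_mem _ _
        (fun tri j => tri ++ ((if j = i - 1 then (if i = 0 then [] else [rowf matrix i (i - 1)]) else [])
          ++ (if j = i then [rowf matrix i i] else [])
          ++ (if j = i + 1 then (if i = (matrix.length : Int) - 1 then [] else [rowf matrix i (i + 1)]) else []))) _ ?_) ?_
    · intro acc' j hj
      simp only []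
      have p1 : (if j = i - 1 then (if i = 0 then [] else [rowf matrix i (i - 1)]) else ([] : List Int))
          = (if j = i - 1 ∧ i ≠ 0 then [rowf matrix i j] else []) := by
        by_cases hj' : j = i - 1
        · subst hj'
          by_cases h0 : i = 0 <;> simp [h0]
        · simp [hj']
      have p2 : (if j = i then [rowf matrix i i] else ([] : List Int))
          = (if j = i then [rowf matrix i j] else []) := by
        by_cases hj' : j = i
        · subst hj'; simp
        · simp [hj']
      have p3 : (if j = i + 1 then (if i = (matrix.length : Int) - 1 then [] else [rowf matrix i (i + 1)]) else ([] : List Int))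
          = (if j = i + 1 ∧ i ≠ (matrix.length : Int) - 1 then [rowf matrix i j] else []) := by
        by_cases hj' : j = i + 1
        · subst hj'
          by_cases h0 : i = (matrix.length : Int) - 1 <;> simp [h0]
        · simp [hj']
      rw [p1, p2, p3]
      split_ifs <;> simp [rowf]
    · rw [PySem.List.foldl_append_eq_flatMap]
      congr 1
      have hband := flatMap_pyRange_band
        (if i = 0 then [] else [rowf matrix i (i - 1)])
        ([rowf matrix i i])
        (if i = (matrix.length : Int) - 1 then [] else [rowf matrix i (i + 1)])
        (i - 1) matrix.length 0 (matrix.length : Int) (by omega)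
      rw [show i - 1 + 1 = i from by ring, show i - 1 + 2 = i + 1 from by ring] at hband
      rw [hband]
      unfold bandlist
      by_cases h0 : i = 0 <;> by_cases hl : i = (matrix.length : Int) - 1 <;>
        · congr 1
          · congr 1 <;> split_ifs <;> first | rfl | (exfalso; omega)
          · split_ifs <;> first | rfl | (exfalso; omega)
  · rw [PySem.List.foldl_append_eq_flatMap, List.nil_append,
      PySem.List.pyRange_zero_natCast matrix.length]
    exact List.flatMap_map (fun k : Nat => (k : Int)) (bandlist matrix) (List.range matrix.length)

-- ===== VERDICT (by name: the statement is the Claim_ definition above) =====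
theorem storage_spec : Claim_equal_storage := by
  intro matrix _ hpre
  unfold Spec_storage
  rw [storageA_eval]
  unfold storage_alt
  simp only []
  rw [PySem.List.foldl_append_eq_flatMap, List.nil_append, enumerate_flatMap]
  apply List.flatMap_congr
  intro k hk
  have hklt : k < matrix.length := List.mem_range.mp hk
  simp only [zero_add]
  have hb : (if k + 1 < matrix.length then k + 1 else k) < (matrix.getD k []).length := by
    rw [List.getD_eq_getElem matrix [] hklt]
    exact hpre k hklt
  rw [slice_band (matrix.getD k []) k matrix.length hklt hb]
  have hrow : PySem.List.pyGetD matrix (k : Int) [] = matrix.getD k [] := by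
    rw [PySem.List.pyGetD_eq_getElem matrix [] (by omega) (by exact_mod_cast hklt),
      List.getD_eq_getElem matrix [] hklt]
    simp
  set row := matrix.getD k [] with hrowdef
  have hrl : k < row.length := by split_ifs at hb <;> omega
  unfold bandlist
  congr 1
  · congr 1
    · -- first band element: only read when k ≠ 0
      split_ifs with h0
      · rfl
      · have hk0 : 0 < k := by omega
        unfold rowf
        rw [hrow, show ((k : Int) - 1) = ((k - 1 : Nat) : Int) from by omega,
          pyGetD_row row (k - 1) (by omega)]
    · -- diagonal element
      unfold rowf
      rw [hrow, pyGetD_row row k hrl]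
  · -- last band element: only read when k ≠ len - 1
    split_ifs with hl
    · rfl
    · have h1 : k + 1 < matrix.length := by omega
      simp only [if_pos h1] at hb
      unfold rowf
      rw [hrow, show ((k : Int) + 1) = ((k + 1 : Nat) : Int) from by omega,
        pyGetD_row row (k + 1) (by omega)]
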